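-- pv_equiv track=rewrite | github.com/NGLemon03/SSS097 | app_dash.py | _build_hide_strategy_options
-- ===== SOURCE A (Python) =====
-- HIDE_PRESET_CHECKLIST_ORDER = [
--     "single trial917",
--     "Ensemble_Majority",
--     "Ensemble_Proportional",
--     "Single 2",
--     "single_1887",
--     "Single 3",
--     "RMA_69",
--     "RMA_669",
--     "STM0",
--     "STM1",
--     "STM3",
--     "STM4",
--     "STM_1939",
--     "STM_2414_273",
-- ]
--
-- def _build_hide_strategy_options(all_names):
--     ordered = []
--     seen = set()
--     for name in HIDE_PRESET_CHECKLIST_ORDER: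
--         if name in all_names and name not in seen:
--             ordered.append(name)
--             seen.add(name)
--     for name in all_names:
--         if name not in seen:
--             ordered.append(name)
--             seen.add(name)
--     return [{"label": name, "value": name} for name in ordered]
-- ===== SOURCE B (Python) =====
-- HIDE_PRESET_CHECKLIST_ORDER = [
--     "single trial917",
--     "Ensemble_Majority",
--     "Ensemble_Proportional",
--     "Single 2",
--     "single_1887",
--     "Single 3",
--     "RMA_69",
--     "RMA_669",
--     "STM0",
--     "STM1",
--     "STM3",
--     "STM4",
--     "STM_1939",
--     "STM_2414_273",
-- ]
--
-- def _build_hide_strategy_options(all_names):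
--     preset_index = {name: i for i, name in enumerate(HIDE_PRESET_CHECKLIST_ORDER)}
--     fallback = len(HIDE_PRESET_CHECKLIST_ORDER)
--     unique = list(dict.fromkeys(all_names))
--     ordered = sorted(unique, key=lambda name: preset_index.get(name, fallback))
--     return [{"label": name, "value": name} for name in ordered]
-- ===== Notes on version B (the rewrite author's own statement) =====
-- stated objective: idiomatic
-- what changed: Replaces A's two append-loops threading a mutable seen-set with a dict.fromkeys dedup followed by a single stable sort keyed on a precomputed preset-index dict (non-preset names key to len(preset), so stability keeps their first-occurrence order).
import Mathlib
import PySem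

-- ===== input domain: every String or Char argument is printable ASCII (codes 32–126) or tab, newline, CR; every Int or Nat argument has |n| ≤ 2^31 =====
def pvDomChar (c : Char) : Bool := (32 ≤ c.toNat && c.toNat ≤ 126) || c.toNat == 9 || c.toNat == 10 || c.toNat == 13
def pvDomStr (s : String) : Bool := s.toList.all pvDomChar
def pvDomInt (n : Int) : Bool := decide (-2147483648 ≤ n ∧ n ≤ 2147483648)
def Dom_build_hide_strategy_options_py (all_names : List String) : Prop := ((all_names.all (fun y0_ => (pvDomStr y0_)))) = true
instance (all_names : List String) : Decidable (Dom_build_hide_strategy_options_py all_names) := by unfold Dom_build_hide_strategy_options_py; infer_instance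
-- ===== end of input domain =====

-- B replaces A's two append-loops with a seen-set by a dedup plus ONE stable sort keyed on a preset-index dict (alternative algorithm, same observable result).

def pvPreset : List String := [
  "single trial917",
  "Ensemble_Majority",
  "Ensemble_Proportional",
  "Single 2",
  "single_1887",
  "Single 3",
  "RMA_69",
  "RMA_669",
  "STM0",
  "STM1",
  "STM3",
  "STM4",
  "STM_1939",
  "STM_2414_273"]

-- ===== PORT A =====
def build_hide_strategy_options_py (all_names : List String) : List (List (String × String)) :=
  let st1 := pvPreset.foldl
    (fun (st : List String × PySem.Set String) name =>
      if name ∈ all_names ∧ ¬ name ∈ st.2 then (st.1 ++ [name], st.2.add name) else st)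
    ([], PySem.Set.empty)
  let st2 := all_names.foldl
    (fun (st : List String × PySem.Set String) name =>
      if ¬ name ∈ st.2 then (st.1 ++ [name], st.2.add name) else st)
    st1
  st2.1.map (fun name => [("label", name), ("value", name)])

-- ===== PORT B =====
-- preset_index = {name: i for i, name in enumerate(HIDE_PRESET_CHECKLIST_ORDER)}
def pvPresetIndex : PySem.Dict String Int :=
  (PySem.List.enumerate pvPreset 0).foldl (fun d p => d.insert p.2 p.1) PySem.Dict.empty

def build_hide_strategy_options_py_alt (all_names : List String) : List (List (String × String)) :=
  let fallback : Int := PySem.List.len pvPreset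
  let unique := PySem.List.dedup all_names
  let ordered := PySem.List.sorted unique (fun name => PySem.Dict.getD pvPresetIndex name fallback) false
  ordered.map (fun name => [("label", name), ("value", name)])

-- ===== PRECONDITION & SPEC =====
def Spec_build_hide_strategy_options_py (all_names : List String) (out : List (List (String × String))) : Prop := out = build_hide_strategy_options_py_alt all_names
instance (all_names : List String) (out : List (List (String × String))) : Decidable (Spec_build_hide_strategy_options_py all_names out) := by unfold Spec_build_hide_strategy_options_py; infer_instance

-- ===== CLAIM (what is proved, stated in full; the proofs are below) =====
def Claim_equal_build_hide_strategy_options_py : Prop := ∀ (all_names : List String), Dom_build_hide_strategy_options_py all_names → Spec_build_hide_strategy_options_py all_names (build_hide_strategy_options_py all_names)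

-- ===== LEMMAS AND PROOFS =====

-- B's sort key, named for the proofs.
def pvKey (name : String) : Int := PySem.Dict.getD pvPresetIndex name (PySem.List.len pvPreset)

lemma pvKey_in : ∀ i (h : i < pvPreset.length), pvKey pvPreset[i] = (i : Int) := by decide

lemma pvKey_out (a : String) (ha : a ∉ pvPreset) : pvKey a = (pvPreset.length : Int) := by
  simp [pvPreset] at ha
  obtain ⟨h1,h2,h3,h4,h5,h6,h7,h8,h9,h10,h11,h12,h13,h14⟩ := ha
  simp [pvKey, pvPresetIndex, pvPreset, PySem.List.enumerate, PySem.Dict.getD, PySem.Dict.empty, PySem.Dict.insert, PySem.Dict.get?]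
  have hn : (List.find? (fun p : String × Int => p.1 == a) [("single trial917", 0), ("Ensemble_Majority", 1), ("Ensemble_Proportional", 2), ("Single 2", 3), ("single_1887", 4), ("Single 3", 5), ("RMA_69", 6), ("RMA_669", 7), ("STM0", 8), ("STM1", 9), ("STM3", 10), ("STM4", 11), ("STM_1939", 12), ("STM_2414_273", 13)]) = none := by
    rw [List.find?_eq_none]
    intro y hy
    fin_cases hy <;> simp_all [beq_iff_eq, ne_comm]
  rw [hn]
  rfl

lemma pv_insertBy_append (bf : String → String → Bool) (x : String) (A B : List String)
    (hA : ∀ a ∈ A, bf x a = false) (hB : ∀ b ∈ B, bf x b = true) :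
    PySem.List.insertBy bf x (A ++ B) = A ++ x :: B := by
  induction A with
  | nil =>
    cases B with
    | nil => simp [PySem.List.insertBy]
    | cons b B' => simp [PySem.List.insertBy, hB b (by simp)]
  | cons a A' ih =>
    simp only [List.cons_append, PySem.List.insertBy, hA a (by simp), Bool.false_eq_true, if_false]
    exact congrArg (a :: ·) (ih (fun a' h => hA a' (by simp [h])))

lemma pv_sorted_preset (k : String → Int)
    (hI : ∀ i (h : i < pvPreset.length), k pvPreset[i] = (i : Int))
    (hO : ∀ a, a ∉ pvPreset → k a = (pvPreset.length : Int)) :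
    ∀ ys : List String, ys.Nodup →
      PySem.List.sorted ys k false
        = pvPreset.filter (fun p => decide (p ∈ ys)) ++ ys.filter (fun y => decide (y ∉ pvPreset)) := by
  have hkP : ∀ a ∈ pvPreset, k a < (pvPreset.length : Int) := by
    intro a ha
    obtain ⟨j, hj, rfl⟩ := List.getElem_of_mem ha
    rw [hI j hj]
    exact_mod_cast hj
  intro ys
  induction ys using List.reverseRecOn with
  | nil => intro _; simp [PySem.List.sorted_eq_foldl_insertBy]
  | append_singleton ys x ih =>
    intro hnd
    have hys : ys.Nodup := (List.nodup_append.mp hnd).1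
    have hx : x ∉ ys := by
      simp only [List.nodup_append] at hnd
      intro hmem
      exact hnd.2.2 x hmem x (by simp) rfl
    have hstep : PySem.List.sorted (ys ++ [x]) k false
        = PySem.List.insertBy (fun a b => decide (k a < k b)) x (PySem.List.sorted ys k false) := by
      rw [PySem.List.sorted_eq_foldl_insertBy, PySem.List.sorted_eq_foldl_insertBy, List.foldl_append]
      rfl
    rw [hstep, ih hys]
    by_cases hxP : x ∈ pvPreset
    · -- x is a preset name: it is inserted at its preset position
      obtain ⟨pre, suf, hdec⟩ := List.append_of_mem hxP
      have hPnd : pvPreset.Nodup := by decide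
      have hmid := (List.nodup_middle.mp (hdec ▸ hPnd))
      have hxps : x ∉ pre ++ suf := (List.nodup_cons.mp hmid).1
      have hxpre : x ∉ pre := fun h => hxps (by simp [h])
      have hxsuf : x ∉ suf := fun h => hxps (by simp [h])
      have hlen : pre.length < pvPreset.length := by rw [hdec]; simp
      have hgx : pvPreset[pre.length]'hlen = x := by
        simp [hdec, List.getElem_append_right (le_refl pre.length)]
      have hkx : k x = (pre.length : Int) := by rw [← hgx]; exact hI _ hlen
      have hpre : ∀ a ∈ pre, k a < (pre.length : Int) := by
        intro a ha
        obtain ⟨j, hj, rfl⟩ := List.getElem_of_mem ha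
        have hjP : j < pvPreset.length := by rw [hdec]; simp; omega
        have hga : pvPreset[j]'hjP = pre[j] := by
          simp [hdec, List.getElem_append_left hj]
        rw [← hga, hI j hjP]
        exact_mod_cast hj
      have hsuf : ∀ b ∈ suf, (pre.length : Int) < k b := by
        intro b hb
        obtain ⟨j, hj, rfl⟩ := List.getElem_of_mem hb
        have hjP : pre.length + (j + 1) < pvPreset.length := by rw [hdec]; simp; omega
        have hopt : pvPreset[pre.length + (j + 1)]? = some suf[j] := by
          rw [hdec, List.getElem?_append_right (by omega)]
          simp [List.getElem?_eq_getElem hj]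
        have hgb : pvPreset[pre.length + (j + 1)]'hjP = suf[j] := by
          have := List.getElem?_eq_getElem hjP
          rw [hopt] at this
          exact (Option.some.inj this).symm
        rw [← hgb, hI _ hjP]
        push_cast
        omega
      have hA' : ∀ a ∈ pre.filter (fun p => decide (p ∈ ys)), (fun a b => decide (k a < k b)) x a = false := by
        intro a ha
        have h1 := hpre a (List.mem_filter.mp ha).1
        simp only [decide_eq_false_iff_not]
        omega
      have hB' : ∀ b ∈ suf.filter (fun p => decide (p ∈ ys)) ++ ys.filter (fun y => decide (y ∉ pvPreset)),
          (fun a b => decide (k a < k b)) x b = true := by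
        intro b hb
        simp only [decide_eq_true_eq]
        rcases List.mem_append.mp hb with hb' | hb'
        · have := hsuf b (List.mem_filter.mp hb').1
          omega
        · have hbP : b ∉ pvPreset := by simpa using (List.mem_filter.mp hb').2
          have := hO b hbP
          have h2 : (pre.length : Int) < (pvPreset.length : Int) := by exact_mod_cast hlen
          omega
      have hsplit : pvPreset.filter (fun p => decide (p ∈ ys))
          = pre.filter (fun p => decide (p ∈ ys)) ++ suf.filter (fun p => decide (p ∈ ys)) := by
        rw [hdec, List.filter_append, List.filter_cons, if_neg (by simpa using hx)]
      rw [hsplit, List.append_assoc,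
        pv_insertBy_append (fun a b => decide (k a < k b)) x _ _ hA' hB']
      have h1 : pre.filter (fun p => decide (p ∈ ys ++ [x])) = pre.filter (fun p => decide (p ∈ ys)) := by
        apply List.filter_congr
        intro a ha
        have hax : a ≠ x := fun h => hxpre (h ▸ ha)
        simp [hax]
      have h2 : suf.filter (fun p => decide (p ∈ ys ++ [x])) = suf.filter (fun p => decide (p ∈ ys)) := by
        apply List.filter_congr
        intro a ha
        have hax : a ≠ x := fun h => hxsuf (h ▸ ha)
        simp [hax]
      have h3 : (ys ++ [x]).filter (fun y => decide (y ∉ pvPreset)) = ys.filter (fun y => decide (y ∉ pvPreset)) := by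
        rw [List.filter_append]
        simp [hxP]
      have h4 : pvPreset.filter (fun p => decide (p ∈ ys ++ [x]))
          = pre.filter (fun p => decide (p ∈ ys)) ++ x :: suf.filter (fun p => decide (p ∈ ys)) := by
        rw [hdec, List.filter_append, List.filter_cons, if_pos (by simp), h1, h2]
      rw [h4, h3]
      simp
    · -- x is not a preset name: it goes to the very end
      have hA' : ∀ a ∈ pvPreset.filter (fun p => decide (p ∈ ys)) ++ ys.filter (fun y => decide (y ∉ pvPreset)),
          (fun a b => decide (k a < k b)) x a = false := by
        intro a ha
        simp only [decide_eq_false_iff_not]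
        have hkxx := hO x hxP
        rcases List.mem_append.mp ha with ha' | ha'
        · have := hkP a (List.mem_filter.mp ha').1
          omega
        · have haP : a ∉ pvPreset := by simpa using (List.mem_filter.mp ha').2
          have := hO a haP
          omega
      have hres := pv_insertBy_append (fun a b => decide (k a < k b)) x
        (pvPreset.filter (fun p => decide (p ∈ ys)) ++ ys.filter (fun y => decide (y ∉ pvPreset))) [] hA' (by simp)
      rw [List.append_nil] at hres
      rw [hres]
      have h3 : (ys ++ [x]).filter (fun y => decide (y ∉ pvPreset)) = ys.filter (fun y => decide (y ∉ pvPreset)) ++ [x] := by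
        rw [List.filter_append]
        simp [hxP]
      have h4 : pvPreset.filter (fun p => decide (p ∈ ys ++ [x])) = pvPreset.filter (fun p => decide (p ∈ ys)) := by
        apply List.filter_congr
        intro p hp
        have hpx : p ≠ x := fun h => hxP (h ▸ hp)
        simp [hpx]
      rw [h4, h3]
      simp

lemma pv_loop1 (all_names : List String) :
    ∀ (Q : List String) (acc : List String) (s : PySem.Set String), Q.Nodup → (∀ q ∈ Q, ¬ q ∈ s) →
      Q.foldl (fun (st : List String × PySem.Set String) name =>
          if name ∈ all_names ∧ ¬ name ∈ st.2 then (st.1 ++ [name], st.2.add name) else st) (acc, s)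
        = (acc ++ Q.filter (fun q => decide (q ∈ all_names)),
           PySem.Set.update s (Q.filter (fun q => decide (q ∈ all_names)))) := by
  intro Q
  induction Q with
  | nil => intro acc s _ _; simp [PySem.Set.update_nil]
  | cons q Q ih =>
    intro acc s hnd hs
    simp only [List.foldl_cons]
    by_cases hq : q ∈ all_names
    · rw [if_pos ⟨hq, hs q (by simp)⟩]
      rw [ih (acc ++ [q]) (s.add q) (List.nodup_cons.mp hnd).2 ?_]
      · simp [hq, PySem.Set.update_cons]
      · intro q' hq'
        rw [PySem.Set.mem_add]
        push Not
        exact ⟨hs q' (by simp [hq']), fun h => (List.nodup_cons.mp hnd).1 (h ▸ hq')⟩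
    · rw [if_neg (by tauto)]
      rw [ih acc s (List.nodup_cons.mp hnd).2 (fun q' h' => hs q' (by simp [h']))]
      simp [hq]

lemma pv_loop2 :
    ∀ (xs acc : List String) (s : PySem.Set String),
      (xs.foldl (fun (st : List String × PySem.Set String) name =>
          if ¬ name ∈ st.2 then (st.1 ++ [name], st.2.add name) else st) (acc, s)).1
        = acc ++ (PySem.Set.ofList xs).filter (fun a => decide (¬ a ∈ s)) := by
  intro xs
  induction xs with
  | nil => intro acc s; simp [PySem.Set.ofList_nil]
  | cons x xs ih =>
    intro acc s
    simp only [List.foldl_cons]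
    rw [PySem.Set.ofList_cons]
    by_cases hx : x ∈ s
    · rw [if_neg (by simpa using hx)]
      rw [ih acc s]
      rw [List.filter_cons, if_neg (by simpa using hx)]
      unfold PySem.Set.discard
      rw [List.filter_filter]
      refine congrArg (acc ++ ·) (List.filter_congr ?_).symm
      intro a _
      rcases eq_or_ne a x with rfl | hax
      · simp [hx]
      · simp [hax]
    · rw [if_pos (by simpa using hx)]
      rw [ih (acc ++ [x]) (s.add x)]
      rw [PySem.Set.add_of_not_mem hx]
      rw [List.filter_cons, if_pos (by simpa using hx)]
      unfold PySem.Set.discard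
      rw [List.filter_filter, List.append_assoc]
      refine congrArg (acc ++ ·) (congrArg (x :: ·) ?_)
      apply List.filter_congr
      intro a _
      rcases eq_or_ne a x with rfl | hax
      · simp
      · simp [hax]

-- ===== VERDICT (by name: the statement is the Claim_ definition above) =====
theorem build_hide_strategy_options_py_spec : Claim_equal_build_hide_strategy_options_py := by
  unfold Claim_equal_build_hide_strategy_options_py
  intro all_names _
  unfold Spec_build_hide_strategy_options_py
  unfold build_hide_strategy_options_py build_hide_strategy_options_py_alt
  simp only []
  rw [pv_loop1 all_names pvPreset [] PySem.Set.empty (by decide) (by intro q _ h; simp [PySem.Set.empty] at h)]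
  rw [pv_loop2]
  rw [PySem.List.dedup_eq_ofList]
  have hkk : (fun name => PySem.Dict.getD pvPresetIndex name (PySem.List.len pvPreset)) = pvKey := rfl
  rw [hkk]
  rw [pv_sorted_preset pvKey pvKey_in pvKey_out (PySem.Set.ofList all_names) (PySem.Set.nodup_ofList all_names)]
  refine congrArg (List.map _) ?_
  have hupd : PySem.Set.update PySem.Set.empty (List.filter (fun q => decide (q ∈ all_names)) pvPreset)
      = List.filter (fun q => decide (q ∈ all_names)) pvPreset := by
    rw [show (PySem.Set.empty : PySem.Set String) = [] from rfl, PySem.Set.update_nil_left]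
    exact PySem.Set.ofList_eq_self_of_nodup _ ((by decide : pvPreset.Nodup).filter _)
  rw [hupd, List.nil_append]
  congr 1
  · apply List.filter_congr
    intro p _
    simp [PySem.Set.mem_ofList]
  · apply List.filter_congr
    intro a ha
    have ha' : a ∈ all_names := (PySem.Set.mem_ofList _ _).mp ha
    simp [List.mem_filter, ha']
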